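-- pv_equiv track=rewrite | github.com/fevancin/Final | src/mashp_tools.py | next_name
-- ===== SOURCE A (Python) =====
-- alphabet = ['a','b','c','d','e','f','g','h','i','j','k','l','m','n','o','p','q','r','s','t','u','v','w','x','y','z']
--
-- def next_name(string):
--     """generatore di nomi alfabetici sequenziali, tipo targhe
--     si parte dalla 'a' alla 'z', poi si aggiunge una 'a' in testa ottenendo
--     'aa', di cui varia il simbolo più a dx, che giunto alla z ('az') provoca il
--     riporto facendo scattare 'ba' e così via, in modo da ottenere un numero
--     potenzialmente infinito di identificativi per prestazioni
--     """
--
--     pos=(alphabet.index(string[-1])+1)%len(alphabet)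
--     if pos>0:
--         return string[:-1]+alphabet[pos]
--     elif pos==0 and len(string)>1:
--         return next_name(string[:-1])+alphabet[pos]
--     elif pos==0 and len(string)==1:
--         return 'aa'
-- ===== SOURCE B (Python) =====
-- alphabet = ['a','b','c','d','e','f','g','h','i','j','k','l','m','n','o','p','q','r','s','t','u','v','w','x','y','z']
--
-- def next_name(string):
--     """Iterative version: walk the characters right-to-left, performing the
--     carry in place on a char list; if every position carried, prepend 'a'."""
--     chars = list(string)
--     i = len(chars) - 1
--     while i >= 0:
--         pos = (alphabet.index(chars[i]) + 1) % 26
--         chars[i] = alphabet[pos]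
--         if pos > 0:
--             return ''.join(chars)
--         i -= 1
--     return 'a' + ''.join(chars)
-- ===== Notes on version B (the rewrite author's own statement) =====
-- stated objective: alternative
-- what changed: Replaced the recursive slice-and-concatenate carry (next_name(string[:-1]) + ...) by a single right-to-left in-place loop over a char list that stops at the first non-carrying position and prepends 'a' only when every position carried.
import Mathlib
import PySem

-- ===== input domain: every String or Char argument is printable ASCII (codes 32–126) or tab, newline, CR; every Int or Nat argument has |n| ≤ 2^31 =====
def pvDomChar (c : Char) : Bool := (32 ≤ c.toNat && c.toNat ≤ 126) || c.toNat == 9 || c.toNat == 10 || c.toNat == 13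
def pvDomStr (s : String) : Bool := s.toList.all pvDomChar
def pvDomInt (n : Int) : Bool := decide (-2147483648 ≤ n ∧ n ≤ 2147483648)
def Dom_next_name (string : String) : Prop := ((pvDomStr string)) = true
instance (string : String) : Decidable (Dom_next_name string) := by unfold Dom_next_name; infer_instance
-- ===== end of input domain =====

-- B replaces A's recursive slice-and-concatenate carry by one right-to-left in-place loop over the
-- character list (objective: alternative decomposition, same cost on typical inputs).

-- ===== PORT A =====
def pyAlphabet : List Char :=
  ['a','b','c','d','e','f','g','h','i','j','k','l','m',
   'n','o','p','q','r','s','t','u','v','w','x','y','z']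

-- core of A on code points; `next_name` wraps it through .toList / String.ofList
def nextNameCore (cs : List Char) : List Char :=
  match PySem.List.pyGet? cs (-1) with          -- string[-1]; none = IndexError (excluded by Pre_)
  | none => []
  | some c =>
    match PySem.List.index? pyAlphabet c with   -- alphabet.index(...); none = ValueError (excluded by Pre_)
    | none => []
    | some idx =>
      let pos : Int := PySem.Int.mod ((idx : Int) + 1) 26
      if pos > 0 then
        PySem.List.slice cs none (some (-1)) ++ [PySem.List.pyGetD pyAlphabet pos ' ']
      else if _h2 : pos = 0 ∧ cs.length > 1 then
        nextNameCore (PySem.List.slice cs none (some (-1))) ++ [PySem.List.pyGetD pyAlphabet pos ' ']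
      else if pos = 0 ∧ cs.length = 1 then
        ['a', 'a']
      else []                                   -- Python falls off the end (returns None); unreachable
termination_by cs.length
decreasing_by
  simp only [PySem.List.slice_to_neg_one, List.length_dropLast]
  omega

def next_name (string : String) : String := String.ofList (nextNameCore string.toList)

-- ===== PORT B =====
-- the while-loop of Source B: index i runs right-to-left over the mutable char list
def altLoop (chars : List Char) (i : Int) : List Char :=
  if _hi : i ≥ 0 then
    let idx := (PySem.List.index? pyAlphabet (PySem.List.pyGetD chars i ' ')).getD 0
                                                -- ValueError excluded by Pre_
    let pos : Int := PySem.Int.mod ((idx : Int) + 1) 26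
    let chars' := PySem.List.pySetD chars i (PySem.List.pyGetD pyAlphabet pos ' ')
    if pos > 0 then chars'                      -- return ''.join(chars)
    else altLoop chars' (i - 1)
  else 'a' :: chars                             -- return 'a' + ''.join(chars)
termination_by (i + 1).toNat
decreasing_by omega

def next_name_alt (string : String) : String :=
  String.ofList (altLoop string.toList ((string.toList.length : Int) - 1))

-- ===== PRECONDITION & SPEC =====
-- A returns exactly on the nonempty strings whose carry chain succeeds: either every character is
-- 'z', or the first non-'z' character from the right is a lowercase letter; Pre_ is exactly that
-- (outside it A raises IndexError or ValueError).
def Pre_next_name (string : String) : Prop :=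
  string.toList ≠ [] ∧
  (string.toList.reverse.dropWhile (fun c => c == 'z') = [] ∨
   (string.toList.reverse.dropWhile (fun c => c == 'z')).headD 'z' ∈ pyAlphabet)
instance (string : String) : Decidable (Pre_next_name string) := by unfold Pre_next_name; infer_instance

def pvWitness_next_name : String := "az"


def Spec_next_name (string : String) (out : String) : Prop := out = next_name_alt string
instance (string : String) (out : String) : Decidable (Spec_next_name string out) := by unfold Spec_next_name; infer_instance

-- ===== CLAIM (what is proved, stated in full; the proofs are below) =====
def Claim_equal_next_name : Prop := ∀ (string : String), Dom_next_name string → Pre_next_name string → Spec_next_name string (next_name string)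

-- ===== LEMMAS AND PROOFS =====

-- the loop ignores list elements to the right of position i: appending one char commutes with it
theorem altLoop_append (n : Nat) : ∀ (xs : List Char) (i : Int) (d : Char),
    (i + 1).toNat = n → i < (xs.length : Int) →
    altLoop (xs ++ [d]) i = altLoop xs i ++ [d] := by
  induction n with
  | zero =>
    intro xs i d hn hlt
    have hi : ¬ i ≥ 0 := by omega
    rw [altLoop.eq_def, altLoop.eq_def]
    simp [hi]
  | succ n ih =>
    intro xs i d hn hlt
    by_cases hi : i ≥ 0
    · have hilt : i.toNat < xs.length := by omega
      have hget : PySem.List.pyGetD (xs ++ [d]) i ' ' = PySem.List.pyGetD xs i ' ' := by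
        rw [PySem.List.pyGetD_eq_getElem _ _ hi (by simp; omega),
            PySem.List.pyGetD_eq_getElem _ _ hi (by exact_mod_cast hlt)]
        exact List.getElem_append_left hilt
      have hset : ∀ v, PySem.List.pySetD (xs ++ [d]) i v = PySem.List.pySetD xs i v ++ [d] := by
        intro v
        rw [PySem.List.pySetD_of_nonneg _ v hi, PySem.List.pySetD_of_nonneg _ v hi]
        exact List.set_append_left _ v hilt
      rw [altLoop.eq_def, altLoop.eq_def]
      simp only [hi, dif_pos, hget, hset]
      split
      · rfl
      · exact ih _ (i - 1) d (by omega)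
          (by rw [PySem.List.length_pySetD]; omega)
    · rw [altLoop.eq_def, altLoop.eq_def]
      simp [hi]

theorem core_eq (cs : List Char) (h1 : cs ≠ [])
    (h2 : cs.reverse.dropWhile (fun c => c == 'z') = [] ∨
          (cs.reverse.dropWhile (fun c => c == 'z')).headD 'z' ∈ pyAlphabet) :
    nextNameCore cs = altLoop cs ((cs.length : Int) - 1) := by
  induction cs using List.reverseRecOn with
  | nil => exact absurd rfl h1
  | append_singleton xs c ih =>
    clear h1
    by_cases hc : c = 'z'
    · subst hc
      rcases eq_or_ne xs [] with hxs | hxs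
      · subst hxs
        rw [nextNameCore.eq_def, altLoop.eq_def]
        norm_num [show PySem.List.pyGet? ['z'] (-1) = some 'z' from by decide,
                  show PySem.List.index? pyAlphabet 'z' = some 25 from by decide,
                  show PySem.List.pyGetD ['z'] 0 ' ' = 'z' from by decide,
                  show PySem.Int.mod ((25:Nat) + 1 : Int) 26 = 0 from by decide]
        rw [altLoop.eq_def]
        norm_num
        decide
      · -- carry case: last char 'z', nonempty prefix
        have hz : PySem.List.index? pyAlphabet 'z' = some 25 := by decide
        rw [nextNameCore.eq_def]
        simp only [PySem.List.pyGet?_neg_one_append_singleton, hz]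
        rw [show (PySem.Int.mod (((25:Nat):Int) + 1) 26) = 0 from by decide]
        have hlp : 0 < xs.length := List.length_pos_iff.mpr hxs
        norm_num [PySem.List.slice_to_neg_one, List.dropLast_concat, hlp]
        rw [altLoop.eq_def]
        have hgetz : PySem.List.pyGetD (xs ++ ['z']) (xs.length : Int) ' ' = 'z' := by
          rw [PySem.List.pyGetD_natCast]
          simp [List.getD_eq_getElem?_getD]
        simp only [hgetz, hz, Option.getD_some, ge_iff_le, Int.natCast_nonneg, dif_pos]
        rw [show (PySem.Int.mod (((25:Nat):Int) + 1) 26) = 0 from by decide]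
        have hset : PySem.List.pySetD (xs ++ ['z']) (xs.length : Int) (PySem.List.pyGetD pyAlphabet 0 ' ') = xs ++ ['a'] := by
          rw [PySem.List.pySetD_natCast, List.set_append_right _ _ (le_refl _)]
          norm_num
          decide
        simp only [hset]
        norm_num
        rw [altLoop_append xs.length xs (↑xs.length - 1) 'a' (by omega) (by omega)]
        have h2' : List.dropWhile (fun c => c == 'z') xs.reverse = [] ∨
            (List.dropWhile (fun c => c == 'z') xs.reverse).headD 'z' ∈ pyAlphabet := by
          simpa [List.dropWhile_cons] using h2
        rw [ih hxs h2', show PySem.List.pyGetD pyAlphabet 0 ' ' = 'a' from by decide]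
    · -- last char is a lowercase letter other than 'z': single step, no carry
      have hr : (xs ++ [c]).reverse.dropWhile (fun x => x == 'z') = c :: xs.reverse := by
        simp [hc]
      rw [hr] at h2
      have hmem : c ∈ pyAlphabet := by
        rcases h2 with h | h
        · exact absurd h (by simp)
        · simpa using h
      obtain ⟨idx, hidx⟩ := Option.isSome_iff_exists.mp
        ((PySem.List.index?_isSome_iff pyAlphabet c).mpr hmem)
      obtain ⟨hk, hval, -⟩ := PySem.List.getElem_of_index?_eq_some hidx
      have hk26 : idx < 26 := by simpa [pyAlphabet] using hk
      have hne25 : idx ≠ 25 := by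
        intro h
        subst h
        have : pyAlphabet[25] = 'z' := rfl
        exact hc (this ▸ hval).symm
      have hpos : PySem.Int.mod ((idx : Int) + 1) 26 = (idx : Int) + 1 := by
        rw [PySem.Int.mod_eq_emod_of_pos (by norm_num)]
        exact Int.emod_eq_of_lt (by omega) (by omega)
      rw [nextNameCore.eq_def]
      simp only [PySem.List.pyGet?_neg_one_append_singleton, hidx, hpos]
      rw [if_pos (by omega : (idx : Int) + 1 > 0)]
      rw [PySem.List.slice_to_neg_one, List.dropLast_concat]
      rw [altLoop.eq_def]
      have hgetc : PySem.List.pyGetD (xs ++ [c]) (((xs ++ [c]).length : Int) - 1) ' ' = c := by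
        rw [show ((xs ++ [c]).length : Int) - 1 = (xs.length : Int) from by simp,
          PySem.List.pyGetD_natCast]
        simp [List.getD_eq_getElem?_getD]
      simp only [hgetc, hidx, Option.getD_some, hpos]
      rw [dif_pos (by simp : ((xs ++ [c]).length : Int) - 1 ≥ 0)]
      rw [if_pos (by omega : (idx : Int) + 1 > 0)]
      rw [show ((xs ++ [c]).length : Int) - 1 = (xs.length : Int) from by simp,
        PySem.List.pySetD_natCast, List.set_append_right _ _ (le_refl _)]
      simp

-- ===== VERDICT (by name: the statement is the Claim_ definition above) =====
theorem next_name_spec : Claim_equal_next_name := by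
  intro s _ hpre
  unfold Spec_next_name next_name next_name_alt
  exact congrArg String.ofList (core_eq s.toList hpre.1 hpre.2)
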